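-- pv_equiv track=rewrite | github.com/JoeBrar/Youtube-video-bot | download_clips_grok.py | match_prompt
-- ===== SOURCE A (Python) =====
-- import unicodedata
--
-- def normalize_text(text: str) -> str:
--     """Normalize text for comparison: NFKC unicode, lowercase, collapse whitespace."""
--     text = unicodedata.normalize("NFKC", text)
--     return " ".join(text.lower().split())
--
-- def match_prompt(scraped_text: str, local_prompts: dict[str, int]) -> tuple[str | None, int | None]:
--     """
--     Try to match scraped prompt text against local prompts.
--     Uses only full-prompt matching to avoid mismatches between similar prompts.
--     Returns (prompt_text, clip_id) or (None, None) if no match.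
--     """
--     clean_scraped = scraped_text.strip().replace('\n', ' ')
--     norm_scraped = normalize_text(clean_scraped)
--
--     # Strategy 1: Exact match
--     for p_text, p_id in local_prompts.items():
--         if p_text == clean_scraped:
--             return p_text, p_id
--
--     # Strategy 2: Normalized exact match (lowercase, collapsed whitespace)
--     for p_text, p_id in local_prompts.items():
--         if normalize_text(p_text) == norm_scraped:
--             return p_text, p_id
--
--     return None, None
-- ===== SOURCE B (Python) =====
-- import unicodedata
--
-- def normalize_text(text: str) -> str:
--     """Normalize text for comparison: NFKC unicode, lowercase, collapse whitespace."""
--     text = unicodedata.normalize("NFKC", text)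
--     return " ".join(text.lower().split())
--
-- def match_prompt(scraped_text: str, local_prompts: dict[str, int]) -> tuple[str | None, int | None]:
--     """Single scan: exact match returns eagerly; first normalized match kept as fallback."""
--     clean_scraped = scraped_text.strip().replace('\n', ' ')
--     norm_scraped = normalize_text(clean_scraped)
--     fallback = None
--     for p_text, p_id in local_prompts.items():
--         if p_text == clean_scraped:
--             return p_text, p_id
--         if fallback is None and normalize_text(p_text) == norm_scraped:
--             fallback = (p_text, p_id)
--     return fallback if fallback is not None else (None, None)
-- ===== Notes on version B (the rewrite author's own statement) =====
-- stated objective: simpler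
-- what changed: Replaced A's two full passes (exact pass, then normalized pass) with a single pass that returns eagerly on an exact match and records the first normalized match as a fallback.
import Mathlib
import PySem

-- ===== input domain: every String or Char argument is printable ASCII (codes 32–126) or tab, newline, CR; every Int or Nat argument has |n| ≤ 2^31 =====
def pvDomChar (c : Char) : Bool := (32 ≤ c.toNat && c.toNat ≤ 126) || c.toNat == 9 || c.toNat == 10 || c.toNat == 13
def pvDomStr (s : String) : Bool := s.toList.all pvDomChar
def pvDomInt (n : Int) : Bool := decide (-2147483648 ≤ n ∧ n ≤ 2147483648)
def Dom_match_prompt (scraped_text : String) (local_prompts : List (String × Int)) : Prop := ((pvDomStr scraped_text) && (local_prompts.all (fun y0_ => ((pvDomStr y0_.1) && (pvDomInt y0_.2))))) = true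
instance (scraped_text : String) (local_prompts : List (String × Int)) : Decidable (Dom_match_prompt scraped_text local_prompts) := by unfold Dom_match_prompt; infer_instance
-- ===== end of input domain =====

-- B replaces A's two full passes with one pass (eager exact return + first-normalized fallback); objective: simpler.
-- ===== PORT A =====
-- unicodedata.normalize("NFKC", ·) is the identity on the printable-ASCII/tab/newline/CR domain, so it is omitted (exact on Dom).
def normalize_text (text : String) : String :=
  PySem.Str.join " " (PySem.Str.split₀ (PySem.Str.lower text))

-- Strategy 1 loop of A: first exact match
def loopExact (clean : String) : List (String × Int) → Option (String × Int)
  | [] => none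
  | p :: rest => if p.1 == clean then some p else loopExact clean rest

-- Strategy 2 loop of A: first normalized match
def loopNorm (norm : String) : List (String × Int) → Option (String × Int)
  | [] => none
  | p :: rest => if normalize_text p.1 == norm then some p else loopNorm norm rest

def match_prompt (scraped_text : String) (local_prompts : List (String × Int)) : Option String × Option Int :=
  let clean_scraped := PySem.Str.replace (PySem.Str.strip scraped_text) "\n" " "
  let norm_scraped := normalize_text clean_scraped
  match loopExact clean_scraped local_prompts with
  | some p => (some p.1, some p.2)
  | none =>
    match loopNorm norm_scraped local_prompts with
    | some p => (some p.1, some p.2)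
    | none => (none, none)

-- ===== PORT B =====
-- the single loop of B: eager exact return, first normalized match remembered in `fallback`
def loopB (clean norm : String) (fallback : Option (String × Int)) : List (String × Int) → Option String × Option Int
  | [] => match fallback with
          | some q => (some q.1, some q.2)
          | none => (none, none)
  | p :: rest =>
    if p.1 == clean then (some p.1, some p.2)
    else loopB clean norm
      (if fallback.isNone && (normalize_text p.1 == norm) then some p else fallback) rest

def match_prompt_alt (scraped_text : String) (local_prompts : List (String × Int)) : Option String × Option Int :=
  let clean_scraped := PySem.Str.replace (PySem.Str.strip scraped_text) "\n" " "
  let norm_scraped := normalize_text clean_scraped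
  loopB clean_scraped norm_scraped none local_prompts

-- ===== PRECONDITION & SPEC =====
def Spec_match_prompt (scraped_text : String) (local_prompts : List (String × Int)) (out : Option String × Option Int) : Prop := out = match_prompt_alt scraped_text local_prompts
instance (scraped_text : String) (local_prompts : List (String × Int)) (out : Option String × Option Int) : Decidable (Spec_match_prompt scraped_text local_prompts out) := by unfold Spec_match_prompt; infer_instance

-- ===== CLAIM (what is proved, stated in full; the proofs are below) =====
def Claim_equal_match_prompt : Prop := ∀ (scraped_text : String) (local_prompts : List (String × Int)), Dom_match_prompt scraped_text local_prompts → Spec_match_prompt scraped_text local_prompts (match_prompt scraped_text local_prompts)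

-- ===== LEMMAS AND PROOFS =====

-- ===== VERDICT (by name: the statement is the Claim_ definition above) =====
-- loop invariant: one-pass B equals A's two passes, with `fallback` taking the place of
-- a normalized match already found in the part of the list consumed so far
theorem loopB_eq (clean norm : String) (fb : Option (String × Int)) (lps : List (String × Int)) :
    loopB clean norm fb lps =
      match loopExact clean lps with
      | some p => (some p.1, some p.2)
      | none =>
        match fb.or (loopNorm norm lps) with
        | some q => (some q.1, some q.2)
        | none => (none, none) := by
  induction lps generalizing fb with
  | nil => cases fb <;> simp [loopB, loopExact, loopNorm]
  | cons p rest ih =>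
    by_cases h1 : p.1 == clean
    · simp [loopB, loopExact, h1]
    · cases fb with
      | some q => simp [loopB, loopExact, loopNorm, h1, ih]
      | none =>
        by_cases h2 : normalize_text p.1 == norm <;>
          simp [loopB, loopExact, loopNorm, h1, h2, ih]

theorem match_prompt_spec : Claim_equal_match_prompt := by
  intro scraped_text local_prompts _
  unfold Spec_match_prompt match_prompt match_prompt_alt
  rw [loopB_eq]
  simp
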